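-- pv_equiv track=rewrite | github.com/jordansquire/adventofcode | 2023/day12/day12_part1.py | is_valid_permutation
-- ===== SOURCE A (Python) =====
-- def is_valid_permutation(line, groupings) -> bool:
--     expected_num_springs = sum(groupings)
--     num_springs = line.count('#')
--     if num_springs != expected_num_springs:
--         return False
--
--     line_groupings = []
--     group_count = 0
--     for char in line:
--         if char == '#':
--             group_count += 1
--         if char == '.' and group_count > 0:
--             line_groupings.append(group_count)
--             group_count = 0
--
--     if group_count > 0:
--         line_groupings.append(group_count)
--
--     return line_groupings == groupings
-- ===== SOURCE B (Python) =====
-- def is_valid_permutation(line, groupings) -> bool: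
--     return [seg.count('#') for seg in line.split('.') if '#' in seg] == groupings
-- ===== Notes on version B (the rewrite author's own statement) =====
-- stated objective: simpler
-- what changed: B replaces the character-by-character counter loop with its flush logic and the separate sum-of-groupings precheck by a single comprehension: split the line on '.' and map each segment containing '#' to its '#' count.
import Mathlib
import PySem

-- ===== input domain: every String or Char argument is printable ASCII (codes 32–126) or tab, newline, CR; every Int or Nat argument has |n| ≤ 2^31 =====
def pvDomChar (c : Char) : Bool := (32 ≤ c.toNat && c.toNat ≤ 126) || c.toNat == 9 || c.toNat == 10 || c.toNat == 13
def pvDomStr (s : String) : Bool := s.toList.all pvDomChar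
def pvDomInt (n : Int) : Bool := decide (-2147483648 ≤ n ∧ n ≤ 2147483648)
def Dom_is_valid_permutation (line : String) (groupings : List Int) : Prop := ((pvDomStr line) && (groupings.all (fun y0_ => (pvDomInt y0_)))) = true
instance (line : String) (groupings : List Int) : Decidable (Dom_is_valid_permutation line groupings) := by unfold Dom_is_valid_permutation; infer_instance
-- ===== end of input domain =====

-- B replaces A's character-by-character counter loop (with flush logic and a separate
-- sum-of-groupings precheck) by one comprehension over the '.'-split segments; objective: simpler.


-- ===== PORT A =====
def is_valid_permutation (line : String) (groupings : List Int) : Bool :=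
  let expected_num_springs : Int := groupings.sum
  let num_springs : Nat := PySem.Str.count line "#"
  if (num_springs : Int) ≠ expected_num_springs then false
  else
    let st := line.toList.foldl (fun (st : List Int × Int) char =>
      let st := if char = '#' then (st.1, st.2 + 1) else st
      if char = '.' ∧ 0 < st.2 then (st.1 ++ [st.2], 0) else st) (([] : List Int), (0 : Int))
    let line_groupings := if 0 < st.2 then st.1 ++ [st.2] else st.1
    line_groupings == groupings

-- ===== PORT B =====
def is_valid_permutation_alt (line : String) (groupings : List Int) : Bool :=
  ((PySem.Chars.splitOn line.toList ['.']).filter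
      (fun seg => PySem.Chars.isIn ['#'] seg)).map
      (fun seg => (PySem.Chars.count seg ['#'] : Int)) == groupings

-- ===== PRECONDITION & SPEC =====
def Spec_is_valid_permutation (line : String) (groupings : List Int) (out : Bool) : Prop := out = is_valid_permutation_alt line groupings
instance (line : String) (groupings : List Int) (out : Bool) : Decidable (Spec_is_valid_permutation line groupings out) := by unfold Spec_is_valid_permutation; infer_instance

-- ===== CLAIM (what is proved, stated in full; the proofs are below) =====
def Claim_equal_is_valid_permutation : Prop := ∀ (line : String) (groupings : List Int), Dom_is_valid_permutation line groupings → Spec_is_valid_permutation line groupings (is_valid_permutation line groupings)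

-- ===== LEMMAS AND PROOFS =====

-- canonical group-run function: pvRun gc l = groups emitted by A's loop starting with pending count gc
def pvRun : Int → List Char → List Int
  | gc, [] => if 0 < gc then [gc] else []
  | gc, c :: r =>
    if c = '#' then pvRun (gc + 1) r
    else if c = '.' then (if 0 < gc then [gc] else []) ++ pvRun 0 r
    else pvRun gc r

-- canonical split-on-'.' with an accumulated (reversed) current segment
def pvS : List Char → List Char → List (List Char)
  | cur, [] => [cur.reverse]
  | cur, c :: r => if c = '.' then cur.reverse :: pvS [] r else pvS (c :: cur) r

def pvPick (s : List Char) : List Int :=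
  if 0 < (s.count '#' : Int) then [(s.count '#' : Int)] else []

theorem go_eq (l : List Char) : ∀ (fuel : Nat) (cur : List Char) (acc : List (List Char)), l.length ≤ fuel →
    PySem.Chars.splitOn.go ['.'] fuel l cur acc = acc.reverse ++ pvS cur l := by
  induction l with
  | nil =>
    intro fuel cur acc h
    cases fuel <;> simp [PySem.Chars.splitOn.go, pvS]
  | cons c r ih =>
    intro fuel cur acc hlen
    simp only [List.length_cons] at hlen
    cases fuel with
    | zero => omega
    | succ f =>
      by_cases hc : c = '.'
      · subst hc
        simp [PySem.Chars.splitOn.go, pvS, List.isPrefixOf, ih f [] (cur.reverse :: acc) (by omega)]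
      · have hb : (('.' : Char) == c) = false := by simp [Ne.symm hc]
        simp [PySem.Chars.splitOn.go, pvS, List.isPrefixOf, hb, hc, ih f (c :: cur) acc (by omega)]

theorem splitOn_dot (l : List Char) : PySem.Chars.splitOn l ['.'] = pvS [] l := by
  simpa using go_eq l (l.length + 1) [] [] (by omega)

theorem countgo_eq (c : Char) (l : List Char) : ∀ (fuel : Nat) (acc : Nat), l.length ≤ fuel →
    PySem.Chars.count.go [c] fuel l acc = acc + l.count c := by
  induction l with
  | nil => intro fuel acc h; cases fuel <;> simp [PySem.Chars.count.go]
  | cons x r ih =>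
    intro fuel acc hlen
    simp only [List.length_cons] at hlen
    cases fuel with
    | zero => omega
    | succ f =>
      by_cases hx : x = c
      · subst hx
        simp [PySem.Chars.count.go, List.isPrefixOf, ih f (acc + 1) (by omega)]
        omega
      · have hb : ((c : Char) == x) = false := by simp [Ne.symm hx]
        simp [PySem.Chars.count.go, List.isPrefixOf, hb, hx, ih f acc (by omega)]

theorem count_single (l : List Char) (c : Char) : PySem.Chars.count l [c] = l.count c := by
  simpa [PySem.Chars.count] using countgo_eq c l l.length 0 (le_refl _)

-- A's loop, characterized: folding the body and flushing the remainder is pvRun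
theorem foldA_eq (cs : List Char) : ∀ (lg : List Int) (gc : Int), 0 ≤ gc →
    (let st := cs.foldl (fun (st : List Int × Int) char =>
        let st := if char = '#' then (st.1, st.2 + 1) else st
        if char = '.' ∧ 0 < st.2 then (st.1 ++ [st.2], 0) else st) (lg, gc)
     if 0 < st.2 then st.1 ++ [st.2] else st.1) = lg ++ pvRun gc cs := by
  induction cs with
  | nil => intro lg gc _; by_cases h : 0 < gc <;> simp [pvRun, h]
  | cons c r ih =>
    intro lg gc hge
    by_cases h1 : c = '#'
    · subst h1
      simpa [pvRun] using ih lg (gc + 1) (by omega)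
    · by_cases h2 : c = '.'
      · subst h2
        by_cases h3 : 0 < gc
        · simpa [pvRun, h1, h3, List.append_assoc] using ih (lg ++ [gc]) 0 (le_refl 0)
        · have hz : gc = 0 := by omega
          subst hz
          simpa [pvRun, h1, h3] using ih lg 0 (le_refl 0)
      · simpa [pvRun, h1, h2] using ih lg gc hge

-- B's segments, characterized: pvRun with pending count = '#'-count of the current segment
theorem run_eq_pick (l : List Char) : ∀ (cur : List Char),
    pvRun ((cur.count '#' : Int)) l = (pvS cur l).flatMap pvPick := by
  induction l with
  | nil => intro cur; simp [pvRun, pvS, pvPick]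
  | cons c r ih =>
    intro cur
    by_cases h1 : c = '#'
    · subst h1
      have h := ih ('#' :: cur)
      have hc : ((('#' :: cur).count '#' : Nat) : Int) = (cur.count '#' : Int) + 1 := by
        simp [List.count_cons]
      rw [hc] at h
      simpa [pvRun, pvS] using h
    · by_cases h2 : c = '.'
      · subst h2
        have h := ih ([] : List Char)
        simp only [List.count_nil, Int.natCast_zero] at h
        simp [pvRun, pvS, h1, pvPick, h]
      · have h := ih (c :: cur)
        have hc : (c :: cur).count '#' = cur.count '#' := by simp [List.count_cons, h1]
        rw [hc] at h
        simp [pvRun, pvS, h1, h2, h]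

theorem flatMap_pick (segs : List (List Char)) :
    segs.flatMap pvPick =
      (segs.filter (fun seg => PySem.Chars.isIn ['#'] seg)).map (fun seg => (PySem.Chars.count seg ['#'] : Int)) := by
  induction segs with
  | nil => simp
  | cons s rest ih =>
    have hmem : PySem.Chars.isIn ['#'] s = true ↔ '#' ∈ s := by
      rw [PySem.Chars.isIn_iff_infix]
      constructor
      · rintro ⟨p, q, rfl⟩; simp
      · intro h
        obtain ⟨p, q, rfl⟩ := List.append_of_mem h
        exact ⟨p, q, by simp⟩
    by_cases h : '#' ∈ s
    · have hc : 0 < (s.count '#' : Int) := by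
        simp [List.count_pos_iff, h]
      simp [pvPick, hc, hmem.mpr h, ih, count_single, h]
    · have hc : ¬ 0 < (s.count '#' : Int) := by
        simp [List.count_eq_zero_of_not_mem h]
      have : PySem.Chars.isIn ['#'] s = false := by
        cases hi : PySem.Chars.isIn ['#'] s
        · rfl
        · exact absurd (hmem.mp hi) h
      simp [pvPick, hc, this, ih, h]

theorem sum_run (l : List Char) : ∀ (gc : Int), 0 ≤ gc →
    (pvRun gc l).sum = gc + (l.count '#' : Int) := by
  induction l with
  | nil =>
    intro gc h
    by_cases h0 : 0 < gc <;> first | (simp [pvRun, h0]; omega) | simp [pvRun, h0]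
  | cons c r ih =>
    intro gc h
    by_cases h1 : c = '#'
    · subst h1
      have hr := ih (gc + 1) (by omega)
      simp [pvRun, hr, List.count_cons]
      push_cast
      ring
    · by_cases h2 : c = '.'
      · subst h2
        have hr := ih 0 (by omega)
        have hcnt : (('.' :: r).count '#' : Int) = (r.count '#' : Int) := by
          simp [List.count_cons]
        by_cases h0 : 0 < gc
        · simp [pvRun, h1, h0, hr, hcnt]
        · simp [pvRun, h1, h0, hr, hcnt]
          omega
      · have hr := ih gc h
        have hcnt : ((c :: r).count '#' : Int) = (r.count '#' : Int) := by
          simp [List.count_cons, h1]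
        simp [pvRun, h1, h2, hr, hcnt]

-- ===== VERDICT (by name: the statement is the Claim_ definition above) =====
theorem is_valid_permutation_spec : Claim_equal_is_valid_permutation := by
  intro line groupings _
  unfold Spec_is_valid_permutation is_valid_permutation is_valid_permutation_alt
  have hG : (let st := line.toList.foldl (fun (st : List Int × Int) char =>
        let st := if char = '#' then (st.1, st.2 + 1) else st
        if char = '.' ∧ 0 < st.2 then (st.1 ++ [st.2], 0) else st) (([] : List Int), (0 : Int))
      if 0 < st.2 then st.1 ++ [st.2] else st.1) = pvRun 0 line.toList := by
    simpa using foldA_eq line.toList [] 0 (le_refl 0)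
  have hB : ((PySem.Chars.splitOn line.toList ['.']).filter
      (fun seg => PySem.Chars.isIn ['#'] seg)).map
      (fun seg => (PySem.Chars.count seg ['#'] : Int)) = pvRun 0 line.toList := by
    rw [splitOn_dot, ← flatMap_pick]
    simpa using (run_eq_pick line.toList []).symm
  have hcnt : (PySem.Str.count line "#" : Int) = (line.toList.count '#' : Int) := by
    rw [PySem.Str.count_eq]
    norm_cast
    simpa using count_single line.toList '#'
  rw [hB]
  by_cases h : (PySem.Str.count line "#" : Int) ≠ groupings.sum
  · simp only [if_pos h, hG]
    have hsum : (pvRun 0 line.toList).sum = (line.toList.count '#' : Int) := by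
      simpa using sum_run line.toList 0 (le_refl 0)
    have : pvRun 0 line.toList ≠ groupings := by
      intro he
      apply h
      rw [hcnt, ← hsum, he]
    simp [this]
  · simp only [h, if_false, hG]
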